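-- pv_equiv track=rewrite | github.com/barbrickdesign/consciousness-revolution--AgentR-overview | PATTERN_CROSS_POLLINATOR.py | get_star_order
-- ===== SOURCE A (Python) =====
-- def get_star_order(items):
--     """
--     Lug nut star pattern - crisscross for even pressure.
--     For 5 items: 1, 3, 5, 2, 4
--     For any n items: opposite corners, spiral inward
--     """
--     n = len(items)
--     if n <= 2:
--         return items
--
--     result = []
--     indices_used = set()
--
--     # Start at 0, then jump to opposite side, spiral inward
--     step = n // 2
--     current = 0
--
--     while len(result) < n:
--         if current not in indices_used and current < n:
--             result.append(items[current])
--             indices_used.add(current)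
--
--         # Jump to opposite side
--         current = (current + step) % n
--
--         # If we've been here, move forward
--         attempts = 0
--         while current in indices_used and attempts < n:
--             current = (current + 1) % n
--             attempts += 1
--
--     return result
-- ===== SOURCE B (Python) =====
-- def get_star_order(items):
--     """Closed-form star order: no probing/used-set simulation.
--     Even n: interleave the two halves (k, h+k); odd n: 0, h, 2h, then the
--     pairs (h-k, 2h-k) walking inward."""
--     n = len(items)
--     if n <= 2:
--         return items
--     h = n // 2
--     if n % 2 == 0:
--         return [items[i] for k in range(h) for i in (k, h + k)]
--     result = [items[0], items[h], items[2 * h]]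
--     for k in range(1, h):
--         result.append(items[h - k])
--         result.append(items[2 * h - k])
--     return result
-- ===== Notes on version B (the rewrite author's own statement) =====
-- stated objective: faster
-- what changed: Replaces the jump-and-probe simulation (used-index set, opposite-side jumps, linear forward probing) with the closed-form index pattern it provably generates: for even n the two halves interleaved (k, h+k), for odd n the slots 0, h, 2h followed by the pairs (h-k, 2h-k) walking inward.
import Mathlib
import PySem

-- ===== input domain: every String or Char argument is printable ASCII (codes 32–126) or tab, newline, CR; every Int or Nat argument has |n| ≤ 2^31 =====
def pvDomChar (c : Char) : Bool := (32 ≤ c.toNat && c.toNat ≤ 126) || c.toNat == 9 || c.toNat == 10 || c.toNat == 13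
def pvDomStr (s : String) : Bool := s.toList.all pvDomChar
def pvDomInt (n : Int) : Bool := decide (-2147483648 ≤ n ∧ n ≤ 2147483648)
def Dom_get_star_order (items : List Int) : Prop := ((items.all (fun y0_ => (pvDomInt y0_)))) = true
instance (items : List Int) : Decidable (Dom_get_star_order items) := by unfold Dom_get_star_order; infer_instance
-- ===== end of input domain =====

-- B replaces A's jump-and-probe simulation by the closed-form index pattern it generates
-- (even n: interleave the two halves; odd n: 0, h, 2h then pairs walking inward); objective: faster (constant factor).

-- ===== PORT A =====
-- inner `while current in indices_used and attempts < n` loop of A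
def starInner (used : PySem.Set Int) (n : Nat) (current : Int) (attempts : Nat) : Int :=
  if h : current ∈ used ∧ attempts < n then
    starInner used n (PySem.Int.mod (current + 1) (n : Int)) (attempts + 1)
  else current
termination_by n - attempts
decreasing_by omega

-- outer `while len(result) < n` loop of A; fuel n suffices (each Python iteration appends one
-- element until the result is full — established by the equivalence proof below)
def starOuter (items : List Int) (n : Nat) (step : Int) :
    Nat → List Int → PySem.Set Int → Int → List Int
  | 0, result, _, _ => result
  | fuel + 1, result, used, current =>
    if result.length < n then
      let st :=
        if current ∉ used ∧ current < (n : Int) then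
          -- items[current]: current is always in range here, so the default is never used
          (result ++ [PySem.List.pyGetD items current 0], PySem.Set.add used current)
        else (result, used)
      let c1 := PySem.Int.mod (current + step) (n : Int)
      let c2 := starInner st.2 n c1 0
      starOuter items n step fuel st.1 st.2 c2
    else result

def get_star_order (items : List Int) : List Int :=
  let n := items.length
  if n ≤ 2 then items
  else
    let step : Int := PySem.Int.floordiv (n : Int) 2
    starOuter items n step n [] PySem.Set.empty 0

-- ===== PORT B =====
def get_star_order_alt (items : List Int) : List Int :=
  let n := items.length
  if n ≤ 2 then items
  else
    let h : Int := PySem.Int.floordiv (n : Int) 2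
    if PySem.Int.mod (n : Int) 2 == 0 then
      -- [items[i] for k in range(h) for i in (k, h + k)]
      (PySem.List.pyRange 0 h 1).flatMap
        (fun k => [PySem.List.pyGetD items k 0, PySem.List.pyGetD items (h + k) 0])
    else
      (PySem.List.pyRange 1 h 1).foldl
        (fun r k => (r ++ [PySem.List.pyGetD items (h - k) 0]) ++ [PySem.List.pyGetD items (2 * h - k) 0])
        [PySem.List.pyGetD items 0 0, PySem.List.pyGetD items h 0, PySem.List.pyGetD items (2 * h) 0]

-- ===== PRECONDITION & SPEC =====
def Spec_get_star_order (items : List Int) (out : List Int) : Prop := out = get_star_order_alt items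
instance (items : List Int) (out : List Int) : Decidable (Spec_get_star_order items out) := by unfold Spec_get_star_order; infer_instance

-- ===== CLAIM (what is proved, stated in full; the proofs are below) =====
def Claim_equal_get_star_order : Prop := ∀ (items : List Int), Dom_get_star_order items → Spec_get_star_order items (get_star_order items)

-- ===== LEMMAS AND PROOFS =====

-- the index sequence A emits for even n = 2*h, after k pairs
def idxE (h : Nat) : Nat → List Int
  | 0 => []
  | k + 1 => idxE h k ++ [(k : Int), (h : Int) + (k : Int)]

-- the index sequence A emits for odd n = 2*h+1, after the first three slots and k pairs
def idxO (h : Nat) : Nat → List Int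
  | 0 => [0, (h : Int), 2 * (h : Int)]
  | k + 1 => idxO h k ++ [(h : Int) - ((k : Int) + 1), 2 * (h : Int) - ((k : Int) + 1)]

lemma mem_idxE (h k : Nat) (x : Int) :
    x ∈ idxE h k ↔ (0 ≤ x ∧ x < k) ∨ ((h : Int) ≤ x ∧ x < (h : Int) + k) := by
  induction k with
  | zero => simp [idxE]
  | succ k ih => simp [idxE, ih]; omega

lemma mem_idxO (h k : Nat) (x : Int) :
    x ∈ idxO h k ↔ x = 0 ∨ ((h : Int) - k ≤ x ∧ x ≤ (h : Int)) ∨ (2 * (h : Int) - k ≤ x ∧ x ≤ 2 * (h : Int)) := by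
  induction k with
  | zero => simp [idxO]; omega
  | succ k ih => simp [idxO, ih]; omega

lemma length_idxE (h k : Nat) : (idxE h k).length = 2 * k := by
  induction k with
  | zero => simp [idxE]
  | succ k ih => simp [idxE, ih]; omega

lemma length_idxO (h k : Nat) : (idxO h k).length = 3 + 2 * k := by
  induction k with
  | zero => simp [idxO]
  | succ k ih => simp [idxO, ih]; omega

lemma mymod_lo (x : Int) (n : Nat) (h0 : 0 ≤ x) (h1 : x < (n : Int)) :
    PySem.Int.mod x (n : Int) = x := by
  rw [PySem.Int.mod_eq_emod_of_pos (by omega)]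
  exact Int.emod_eq_of_lt h0 h1

lemma mymod_hi (x : Int) (n : Nat) (h0 : (n : Int) ≤ x) (h1 : x < 2 * (n : Int)) :
    PySem.Int.mod x (n : Int) = x - n := by
  rw [PySem.Int.mod_eq_emod_of_pos (by omega)]
  have : x % (n : Int) = (x - n) % n := (Int.sub_emod_right x n).symm
  rw [this, Int.emod_eq_of_lt (by omega) (by omega)]

lemma starInner_stop (used : PySem.Set Int) (n : Nat) (c : Int) (a : Nat) (h : c ∉ used) :
    starInner used n c a = c := by
  rw [starInner]; simp [h]

lemma starInner_step (used : PySem.Set Int) (n : Nat) (c : Int) (a : Nat)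
    (h1 : c ∈ used) (h2 : a < n) :
    starInner used n c a = starInner used n (PySem.Int.mod (c + 1) (n : Int)) (a + 1) := by
  rw [starInner]; simp [h1, h2]

lemma starOuter_zero (items : List Int) (n : Nat) (step : Int) (result : List Int)
    (used : PySem.Set Int) (current : Int) :
    starOuter items n step 0 result used current = result := rfl

-- one outer iteration in the (always-taken) appending case
lemma starOuter_append (items : List Int) (n : Nat) (step : Int) (fuel : Nat)
    (result : List Int) (used : PySem.Set Int) (current : Int)
    (hlen : result.length < n) (hmem : current ∉ used) (hlt : current < (n : Int)) :
    starOuter items n step (fuel + 1) result used current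
      = starOuter items n step fuel (result ++ [PySem.List.pyGetD items current 0])
          (PySem.Set.add used current)
          (starInner (PySem.Set.add used current) n (PySem.Int.mod (current + step) (n : Int)) 0) := by
  show (if result.length < n then _ else result) = _
  rw [if_pos hlen]
  simp [hmem, hlt]

-- even case: invariant of A's loop, two outer iterations per pair
lemma even_loop (items : List Int) (h : Nat) (hh : 1 ≤ h) (hn : items.length = 2 * h) :
    ∀ k, k ≤ h →
      starOuter items (2 * h) (h : Int) (2 * (h - k))
        ((idxE h k).map (fun i => PySem.List.pyGetD items i 0)) (idxE h k) (k : Int)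
      = (idxE h h).map (fun i => PySem.List.pyGetD items i 0) := by
  intro k hk
  generalize hd : h - k = d
  induction d generalizing k with
  | zero =>
      have : k = h := by omega
      subst this
      simp [starOuter_zero]
  | succ d ih =>
      have hkh : k < h := by omega
      have hn2 : (0:Nat) < 2 * h := by omega
      -- first iteration: append items[k]
      have m1 : (k : Int) ∉ idxE h k := by
        rw [mem_idxE]; omega
      rw [show 2 * (d + 1) = (2 * d + 1) + 1 by omega]
      rw [starOuter_append items (2*h) (h:Int) _ _ _ _ (by rw [List.length_map, length_idxE]; omega) m1 (by omega)]
      rw [PySem.Set.add_of_not_mem m1]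
      rw [mymod_lo ((k:Int) + (h:Int)) (2*h) (by positivity) (by omega)]
      have m2 : ((k : Int) + (h : Int)) ∉ idxE h k ++ [(k : Int)] := by
        simp [mem_idxE]; omega
      rw [starInner_stop _ _ _ _ m2]
      -- second iteration: append items[h + k]
      rw [starOuter_append items (2*h) (h:Int) _ _ _ _ (by simp [length_idxE]; omega) m2 (by push_cast; omega)]
      rw [PySem.Set.add_of_not_mem m2]
      have hu : (idxE h k ++ [(k : Int)]) ++ [(k : Int) + (h : Int)] = idxE h (k + 1) := by
        simp [idxE]; ring
      have hr : ((idxE h k).map (fun i => PySem.List.pyGetD items i 0) ++ [PySem.List.pyGetD items (k:Int) 0])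
          ++ [PySem.List.pyGetD items ((k:Int) + (h:Int)) 0]
          = (idxE h (k+1)).map (fun i => PySem.List.pyGetD items i 0) := by
        simp [idxE]; rw [show (h:Int) + (k:Int) = (k:Int) + (h:Int) by ring]
      rw [hu, hr]
      rw [mymod_hi ((k:Int) + (h:Int) + (h:Int)) (2*h) (by push_cast; omega) (by push_cast; omega)]
      by_cases hlast : k + 1 = h
      · have : d = 0 := by omega
        subst this
        rw [starOuter_zero, hlast]
      · have m3 : ((k:Int) + (h:Int) + (h:Int) - ((2*h : Nat) : Int)) ∈ idxE h (k + 1) := by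
          rw [mem_idxE]; push_cast; omega
        rw [starInner_step _ _ _ _ m3 hn2]
        rw [mymod_lo _ (2*h) (by push_cast; omega) (by push_cast; omega)]
        have m4 : ((k:Int) + (h:Int) + (h:Int) - ((2*h : Nat) : Int) + 1) ∉ idxE h (k + 1) := by
          rw [mem_idxE]; push_cast; omega
        rw [starInner_stop _ _ _ _ m4]
        have := ih (k+1) (by omega) (by omega)
        rw [show ((k+1 : Nat) : Int) = (k:Int) + (h:Int) + (h:Int) - ((2*h : Nat) : Int) + 1 by push_cast; ring] at this
        exact this

-- odd case: invariant of A's loop after the first three slots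
lemma odd_loop (items : List Int) (h : Nat) (hh : 2 ≤ h) (hn : items.length = 2 * h + 1) :
    ∀ k, k ≤ h - 1 →
      starOuter items (2 * h + 1) (h : Int) (2 * (h - 1 - k))
        ((idxO h k).map (fun i => PySem.List.pyGetD items i 0)) (idxO h k) ((h : Int) - 1 - k)
      = (idxO h (h - 1)).map (fun i => PySem.List.pyGetD items i 0) := by
  intro k hk
  generalize hd : h - 1 - k = d
  induction d generalizing k with
  | zero =>
      have : k = h - 1 := by omega
      subst this
      simp [starOuter_zero]
  | succ d ih =>
      have hkh : k < h - 1 := by omega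
      have hn2 : (0:Nat) < 2 * h + 1 := by omega
      -- first iteration: append items[h-1-k]
      have m1 : ((h:Int) - 1 - k) ∉ idxO h k := by
        rw [mem_idxO]; omega
      rw [show 2 * (d + 1) = (2 * d + 1) + 1 by omega]
      rw [starOuter_append items (2*h+1) (h:Int) _ _ _ _ (by rw [List.length_map, length_idxO]; omega) m1 (by push_cast; omega)]
      rw [PySem.Set.add_of_not_mem m1]
      rw [mymod_lo ((h:Int) - 1 - k + (h:Int)) (2*h+1) (by omega) (by push_cast; omega)]
      have m2 : ((h:Int) - 1 - k + (h:Int)) ∉ idxO h k ++ [(h:Int) - 1 - k] := by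
        simp [mem_idxO]; omega
      rw [starInner_stop _ _ _ _ m2]
      -- second iteration: append items[2h-1-k]
      rw [starOuter_append items (2*h+1) (h:Int) _ _ _ _ (by simp [length_idxO]; omega) m2 (by push_cast; omega)]
      rw [PySem.Set.add_of_not_mem m2]
      have hu : (idxO h k ++ [(h:Int) - 1 - k]) ++ [(h:Int) - 1 - k + (h:Int)] = idxO h (k + 1) := by
        simp [idxO]; constructor <;> ring
      have hr : (((idxO h k).map (fun i => PySem.List.pyGetD items i 0) ++ [PySem.List.pyGetD items ((h:Int) - 1 - k) 0])
          ++ [PySem.List.pyGetD items ((h:Int) - 1 - k + (h:Int)) 0])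
          = (idxO h (k+1)).map (fun i => PySem.List.pyGetD items i 0) := by
        simp [idxO]
        constructor <;> (congr 1; ring)
      rw [hu, hr]
      rw [mymod_hi ((h:Int) - 1 - k + (h:Int) + (h:Int)) (2*h+1) (by push_cast; omega) (by push_cast; omega)]
      by_cases hlast : k + 1 = h - 1
      · have : d = 0 := by omega
        subst this
        rw [starOuter_zero, hlast]
      · have m3 : ((h:Int) - 1 - k + (h:Int) + (h:Int) - ((2*h+1 : Nat) : Int)) ∉ idxO h (k + 1) := by
          rw [mem_idxO]; push_cast; omega
        rw [starInner_stop _ _ _ _ m3]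
        have := ih (k+1) (by omega) (by omega)
        rw [show ((h:Int) - 1 - (k+1 : Nat)) = (h:Int) - 1 - k + (h:Int) + (h:Int) - ((2*h+1 : Nat) : Int) by push_cast; ring] at this
        exact this

lemma a_even (items : List Int) (h : Nat) (hh : 2 ≤ h) (hn : items.length = 2 * h) :
    get_star_order items = (idxE h h).map (fun i => PySem.List.pyGetD items i 0) := by
  rw [get_star_order]
  simp only [hn]
  rw [if_neg (by omega)]
  have e1 : PySem.Int.floordiv ((2*h : Nat) : Int) 2 = (h : Int) := by
    have := PySem.Int.floordiv_natCast (2*h) 2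
    rw [show ((2*h)/2 : Nat) = h by omega] at this
    exact_mod_cast this
  rw [e1]
  have := even_loop items h (by omega) hn 0 (by omega)
  simpa [idxE, PySem.Set.empty] using this

lemma starOuter_append' (items : List Int) (n : Nat) (step : Int) (fuel : Nat)
    (result : List Int) (used : PySem.Set Int) (current : Int)
    (hf : 0 < fuel)
    (hlen : result.length < n) (hmem : current ∉ used) (hlt : current < (n : Int)) :
    starOuter items n step fuel result used current
      = starOuter items n step (fuel - 1) (result ++ [PySem.List.pyGetD items current 0])
          (PySem.Set.add used current)
          (starInner (PySem.Set.add used current) n (PySem.Int.mod (current + step) (n : Int)) 0) := by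
  obtain ⟨f, rfl⟩ : ∃ f, fuel = f + 1 := ⟨fuel - 1, by omega⟩
  rw [starOuter_append items n step f result used current hlen hmem hlt]
  rfl

lemma a_odd (items : List Int) (h : Nat) (hh : 1 ≤ h) (hn : items.length = 2 * h + 1) :
    get_star_order items = (idxO h (h - 1)).map (fun i => PySem.List.pyGetD items i 0) := by
  rw [get_star_order]
  simp only [hn]
  rw [if_neg (by omega)]
  have e1 : PySem.Int.floordiv ((2*h+1 : Nat) : Int) 2 = (h : Int) := by
    have := PySem.Int.floordiv_natCast (2*h+1) 2
    rw [show ((2*h+1)/2 : Nat) = h by omega] at this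
    exact_mod_cast this
  rw [e1]
  -- first three iterations: items[0], items[h], items[2h]
  have m1 : (0 : Int) ∉ (PySem.Set.empty : PySem.Set Int) := by simp [PySem.Set.empty]
  rw [starOuter_append' items (2*h+1) (h:Int) _ _ _ _ (by omega) (by simp) m1 (by push_cast; omega)]
  rw [PySem.Set.add_of_not_mem m1]
  rw [show ((PySem.Set.empty : PySem.Set Int) ++ [(0:Int)]) = [(0:Int)] from rfl]
  rw [mymod_lo ((0:Int) + (h:Int)) (2*h+1) (by omega) (by push_cast; omega)]
  have m2 : ((0:Int) + (h:Int)) ∉ [(0:Int)] := by simp; omega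
  rw [starInner_stop _ _ _ _ m2]
  rw [starOuter_append' items (2*h+1) (h:Int) _ _ _ _ (by omega) (by simp; omega) m2 (by push_cast; omega)]
  rw [PySem.Set.add_of_not_mem m2]
  rw [mymod_lo ((0:Int) + (h:Int) + (h:Int)) (2*h+1) (by omega) (by push_cast; omega)]
  have m3 : ((0:Int) + (h:Int) + (h:Int)) ∉ [(0:Int)] ++ [(0:Int) + (h:Int)] := by simp; omega
  rw [starInner_stop _ _ _ _ m3]
  rw [starOuter_append' items (2*h+1) (h:Int) _ _ _ _ (by omega) (by simp; omega) m3 (by push_cast; omega)]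
  rw [PySem.Set.add_of_not_mem m3]
  rw [mymod_hi ((0:Int) + (h:Int) + (h:Int) + (h:Int)) (2*h+1) (by push_cast; omega) (by push_cast; omega)]
  have hu0 : ([(0:Int)] ++ [(0:Int) + (h:Int)]) ++ [(0:Int) + (h:Int) + (h:Int)] = idxO h 0 := by
    simp [idxO]; ring
  have hr0 : ([] ++ [PySem.List.pyGetD items (0:Int) 0] ++ [PySem.List.pyGetD items ((0:Int) + (h:Int)) 0]
      ++ [PySem.List.pyGetD items ((0:Int) + (h:Int) + (h:Int)) 0])
      = (idxO h 0).map (fun i => PySem.List.pyGetD items i 0) := by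
    simp [idxO]
    congr 1
    ring
  rw [hu0, hr0]
  by_cases h1 : h = 1
  · subst h1
    rw [show 2*1+1-1-1-1 = 0 from rfl, starOuter_zero]
  · have mh : ((0:Int) + (h:Int) + (h:Int) + (h:Int) - ((2*h+1 : Nat) : Int)) ∉ idxO h 0 := by
      rw [mem_idxO]; push_cast; omega
    rw [starInner_stop _ _ _ _ mh]
    have := odd_loop items h (by omega) hn 0 (by omega)
    rw [show ((h:Int) - 1 - ((0:Nat):Int)) = (0:Int) + (h:Int) + (h:Int) + (h:Int) - ((2*h+1 : Nat) : Int) by push_cast; ring] at this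
    rw [show 2 * (h - 1 - 0) = 2*h+1-1-1-1 by omega] at this
    exact this

lemma flat_idxE (items : List Int) (h : Nat) :
    ∀ k : Nat, ((PySem.List.pyRange 0 (k : Int) 1).flatMap
        (fun j => [PySem.List.pyGetD items j 0, PySem.List.pyGetD items ((h : Int) + j) 0]))
      = (idxE h k).map (fun i => PySem.List.pyGetD items i 0) := by
  intro k
  induction k with
  | zero => simp [PySem.List.pyRange_one_eq_nil, idxE]
  | succ k ih =>
      rw [Nat.cast_add, Nat.cast_one, PySem.List.pyRange_one_succ_right (by positivity),
        List.flatMap_append, ih]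
      simp [idxE]

lemma fold_idxO (items : List Int) (h : Nat) :
    ∀ k : Nat, ((PySem.List.pyRange 1 ((k : Int) + 1) 1).foldl
        (fun r j => (r ++ [PySem.List.pyGetD items ((h : Int) - j) 0]) ++ [PySem.List.pyGetD items (2 * (h : Int) - j) 0])
        [PySem.List.pyGetD items 0 0, PySem.List.pyGetD items (h : Int) 0, PySem.List.pyGetD items (2 * (h : Int)) 0])
      = (idxO h k).map (fun i => PySem.List.pyGetD items i 0) := by
  intro k
  induction k with
  | zero => simp [PySem.List.pyRange_one_eq_nil, idxO]
  | succ k ih =>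
      rw [Nat.cast_add, Nat.cast_one, PySem.List.pyRange_one_succ_right (by omega),
        List.foldl_append, ih]
      simp [idxO]

lemma b_even (items : List Int) (h : Nat) (hh : 2 ≤ h) (hn : items.length = 2 * h) :
    get_star_order_alt items = (idxE h h).map (fun i => PySem.List.pyGetD items i 0) := by
  rw [get_star_order_alt]
  simp only [hn]
  rw [if_neg (by omega)]
  have e1 : PySem.Int.floordiv ((2*h : Nat) : Int) 2 = (h : Int) := by
    have := PySem.Int.floordiv_natCast (2*h) 2
    rw [show ((2*h)/2 : Nat) = h by omega] at this
    exact_mod_cast this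
  have e2 : PySem.Int.mod ((2*h : Nat) : Int) 2 = 0 := by
    have := PySem.Int.mod_natCast (2*h) 2
    rw [show ((2*h)%2 : Nat) = 0 by omega] at this
    exact_mod_cast this
  rw [e1, e2, if_pos (show ((0:Int) == 0) = true from rfl)]
  exact flat_idxE items h h

lemma b_odd (items : List Int) (h : Nat) (hh : 1 ≤ h) (hn : items.length = 2 * h + 1) :
    get_star_order_alt items = (idxO h (h - 1)).map (fun i => PySem.List.pyGetD items i 0) := by
  rw [get_star_order_alt]
  simp only [hn]
  rw [if_neg (by omega)]
  have e1 : PySem.Int.floordiv ((2*h+1 : Nat) : Int) 2 = (h : Int) := by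
    have := PySem.Int.floordiv_natCast (2*h+1) 2
    rw [show ((2*h+1)/2 : Nat) = h by omega] at this
    exact_mod_cast this
  have e2 : PySem.Int.mod ((2*h+1 : Nat) : Int) 2 = 1 := by
    have := PySem.Int.mod_natCast (2*h+1) 2
    rw [show ((2*h+1)%2 : Nat) = 1 by omega] at this
    exact_mod_cast this
  rw [e1, e2, if_neg (by decide)]
  have := fold_idxO items h (h - 1)
  rwa [show ((h - 1 : Nat) : Int) + 1 = (h : Int) by omega] at this

-- ===== VERDICT (by name: the statement is the Claim_ definition above) =====
theorem get_star_order_spec : Claim_equal_get_star_order := by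
  intro items _
  unfold Spec_get_star_order
  by_cases hle : items.length ≤ 2
  · simp [get_star_order, get_star_order_alt, hle]
  · rw [Nat.not_le] at hle
    rcases Nat.even_or_odd items.length with ⟨h, hn⟩ | ⟨h, hn⟩
    · have hh : 2 ≤ h := by omega
      rw [a_even items h hh (by omega), b_even items h hh (by omega)]
    · have hh : 1 ≤ h := by omega
      rw [a_odd items h hh (by omega), b_odd items h hh (by omega)]
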